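-- pv_equiv track=rewrite | github.com/dangoli/python_beginner | leetcode/02_二分算法/02二分答案/02_04最小化最大值/09_2616_test.py | check
-- ===== SOURCE A (Python) =====
-- nums = [1,1,2,3,7,10]
--
-- p = 2
--
-- def check(mx: int) -> bool:
--     cnt = i = 0
--     while i < len(nums) - 1:
--         if nums[i + 1] - nums[i] <= mx:
--             cnt += 1
--             i += 2
--         else:
--             i += 1
--     return cnt >= p
-- ===== SOURCE B (Python) =====
-- nums = [1,1,2,3,7,10]
--
-- p = 2
--
-- def check(mx: int) -> bool:
--     # bottom-up DP over prefixes with rolling variables: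
--     # a = dp[i-2], b = dp[i-1] = max pairs in nums[:i-1]
--     a = b = 0
--     for i in range(2, len(nums) + 1):
--         a, b = b, max(b, a + (1 if nums[i - 1] - nums[i - 2] <= mx else 0))
--     return b >= p
-- ===== Notes on version B (the rewrite author's own statement) =====
-- stated objective: alternative
-- what changed: Replaced the greedy skip-by-2 while loop counting adjacent pairs with a bottom-up DP recurrence dp[i]=max(dp[i-1],dp[i-2]+pair(i)) kept in two rolling variables.
import Mathlib
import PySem

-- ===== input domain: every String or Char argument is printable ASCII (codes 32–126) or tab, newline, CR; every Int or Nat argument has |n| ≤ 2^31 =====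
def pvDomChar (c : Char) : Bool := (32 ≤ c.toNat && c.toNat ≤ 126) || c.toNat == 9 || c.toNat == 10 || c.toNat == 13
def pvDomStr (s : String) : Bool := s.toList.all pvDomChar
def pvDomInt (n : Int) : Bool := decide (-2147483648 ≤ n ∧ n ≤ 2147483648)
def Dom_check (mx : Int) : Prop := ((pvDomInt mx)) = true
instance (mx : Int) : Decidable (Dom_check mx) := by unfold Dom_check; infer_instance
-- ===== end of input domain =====

-- B replaces A's greedy skip-by-2 scan with a bottom-up DP recurrence in rolling variables (alternative decomposition, same cost).

-- ===== PORT A =====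
-- module constants
def pvNums : List Int := [1, 1, 2, 3, 7, 10]
def pvP : Int := 2

-- the while loop of A; `fuel` only guarantees termination (the loop advances i by ≥ 1 each step, so fuel = length suffices)
def checkLoop (mx : Int) (fuel : Nat) (cnt : Int) (i : Nat) : Int :=
  match fuel with
  | 0 => cnt
  | fuel + 1 =>
    if i < pvNums.length - 1 then
      if pvNums.getD (i + 1) 0 - pvNums.getD i 0 ≤ mx then
        checkLoop mx fuel (cnt + 1) (i + 2)
      else
        checkLoop mx fuel cnt (i + 1)
    else cnt

def check (mx : Int) : Bool :=
  decide (checkLoop mx pvNums.length 0 0 ≥ pvP)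

-- ===== PORT B =====
def check_alt (mx : Int) : Bool :=
  let st := (PySem.List.pyRange 2 (pvNums.length + 1) 1).foldl
    (fun (ab : Int × Int) i =>
      (ab.2, max ab.2 (ab.1 + (if pvNums.getD (i - 1).toNat 0 - pvNums.getD (i - 2).toNat 0 ≤ mx then 1 else 0))))
    (0, 0)
  decide (st.2 ≥ pvP)

-- ===== PRECONDITION & SPEC =====
def Spec_check (mx : Int) (out : Bool) : Prop := out = check_alt mx
instance (mx : Int) (out : Bool) : Decidable (Spec_check mx out) := by unfold Spec_check; infer_instance

-- ===== CLAIM (what is proved, stated in full; the proofs are below) =====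
def Claim_equal_check : Prop := ∀ (mx : Int), Dom_check mx → Spec_check mx (check mx)

-- ===== LEMMAS AND PROOFS =====

-- ===== VERDICT (by name: the statement is the Claim_ definition above) =====
set_option maxHeartbeats 1000000 in
theorem check_spec : Claim_equal_check := by
  intro mx _
  unfold Spec_check check check_alt
  have hr : PySem.List.pyRange 2 (pvNums.length + 1) 1 = [2, 3, 4, 5, 6] := by
    rw [PySem.List.pyRange_one]; decide
  rw [hr]
  have t2 : Int.toNat 2 = 2 := rfl
  have t3 : Int.toNat 3 = 3 := rfl
  have t4 : Int.toNat 4 = 4 := rfl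
  have t5 : Int.toNat 5 = 5 := rfl
  have t6 : Int.toNat 6 = 6 := rfl
  by_cases h0 : (0 : Int) ≤ mx <;> by_cases h1 : (1 : Int) ≤ mx <;>
    by_cases h3 : (3 : Int) ≤ mx <;> by_cases h4 : (4 : Int) ≤ mx <;>
    first
      | (exfalso; omega)
      | (norm_num [checkLoop, pvNums, pvP, t2, t3, t4, t5, t6, h0, h1, h3, h4, List.getD]; omega)
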